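-- pv_equiv track=rewrite | github.com/dragonheart8787/bule-team-firewall | tests/rule_governance_test.py | _analyze_rule_hits
-- ===== SOURCE A (Python) =====
-- from typing import List, Dict, Tuple, Set
--
-- def _analyze_rule_hits(request: Dict, response: Dict) -> List[Dict]:
--     """分析規則命中"""
--     rule_hits = []
--
--     # 基於請求特徵分析
--     path = request['path'].lower()
--
--     # SQL 注入檢測
--     sql_patterns = ["'", "union", "select", "or", "and", "drop", "insert"]
--     if any(pattern in path for pattern in sql_patterns):
--         rule_hits.append({
--             "rule_id": "SQL_INJECTION",
--             "severity": "HIGH",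
--             "pattern": "SQL injection pattern detected"
--         })
--
--     # XSS 檢測
--     xss_patterns = ["<script", "javascript:", "onerror", "onload"]
--     if any(pattern in path for pattern in xss_patterns):
--         rule_hits.append({
--             "rule_id": "XSS",
--             "severity": "HIGH",
--             "pattern": "XSS pattern detected"
--         })
--
--     # 路徑遍歷檢測
--     traversal_patterns = ["../", "..\\", "%2e%2e"]
--     if any(pattern in path for pattern in traversal_patterns):
--         rule_hits.append({
--             "rule_id": "PATH_TRAVERSAL",
--             "severity": "HIGH",
--             "pattern": "Path traversal pattern detected"
--         })
--
--     # 命令注入檢測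
--     cmd_patterns = [";", "|", "&", "$", "cat", "ls", "dir"]
--     if any(pattern in path for pattern in cmd_patterns):
--         rule_hits.append({
--             "rule_id": "COMMAND_INJECTION",
--             "severity": "HIGH",
--             "pattern": "Command injection pattern detected"
--         })
--
--     # 速率限制檢測
--     if response.get("status_code") == 429:
--         rule_hits.append({
--             "rule_id": "RATE_LIMIT",
--             "severity": "MEDIUM",
--             "pattern": "Rate limit exceeded"
--         })
--
--     return rule_hits
-- ===== SOURCE B (Python) =====
-- # Multi-pattern single scan: walk the path position by position, collecting the
-- # indices of rules whose pattern starts at that position; then emit rule dicts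
-- # in table order, plus the trailing rate-limit check.
--
-- _RULES = [
--     ("SQL_INJECTION", "HIGH", "SQL injection pattern detected"),
--     ("XSS", "HIGH", "XSS pattern detected"),
--     ("PATH_TRAVERSAL", "HIGH", "Path traversal pattern detected"),
--     ("COMMAND_INJECTION", "HIGH", "Command injection pattern detected"),
-- ]
--
-- _PATTERNS = [
--     ("'", 0), ("union", 0), ("select", 0), ("or", 0), ("and", 0), ("drop", 0), ("insert", 0),
--     ("<script", 1), ("javascript:", 1), ("onerror", 1), ("onload", 1),
--     ("../", 2), ("..\\", 2), ("%2e%2e", 2),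
--     (";", 3), ("|", 3), ("&", 3), ("$", 3), ("cat", 3), ("ls", 3), ("dir", 3),
-- ]
--
-- def _analyze_rule_hits(request, response):
--     path = request['path'].lower()
--     matched = set()
--     for i in range(len(path) + 1):
--         for pat, idx in _PATTERNS:
--             if path.startswith(pat, i):
--                 matched.add(idx)
--     hits = [{"rule_id": r, "severity": s, "pattern": m}
--             for idx, (r, s, m) in enumerate(_RULES) if idx in matched]
--     if response.get("status_code") == 429:
--         hits.append({"rule_id": "RATE_LIMIT", "severity": "MEDIUM",
--                      "pattern": "Rate limit exceeded"})
--     return hits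
-- ===== Notes on version B (the rewrite author's own statement) =====
-- stated objective: alternative
-- what changed: Replaces A's four per-rule any(pattern in path) substring scans by a single position-major multi-pattern scan: one walk over the path's start positions collects into a set the indices of rules whose pattern starts there, and the hit dicts are then emitted from a rule table in order; the rate-limit rule stays a trailing check.
import Mathlib
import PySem

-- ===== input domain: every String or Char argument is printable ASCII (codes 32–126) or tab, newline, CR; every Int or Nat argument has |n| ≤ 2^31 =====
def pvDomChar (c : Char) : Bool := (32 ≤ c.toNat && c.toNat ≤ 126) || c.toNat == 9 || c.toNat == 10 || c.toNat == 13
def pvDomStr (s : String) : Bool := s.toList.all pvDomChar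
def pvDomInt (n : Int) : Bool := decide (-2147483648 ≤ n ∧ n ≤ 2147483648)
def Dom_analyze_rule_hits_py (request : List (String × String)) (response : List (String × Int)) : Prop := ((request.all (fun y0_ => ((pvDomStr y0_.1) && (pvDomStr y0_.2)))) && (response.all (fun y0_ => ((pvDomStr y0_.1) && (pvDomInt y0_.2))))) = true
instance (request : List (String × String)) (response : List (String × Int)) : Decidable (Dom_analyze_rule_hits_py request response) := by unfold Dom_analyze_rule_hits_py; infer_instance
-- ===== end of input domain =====

-- B replaces A's four per-rule 'any(pattern in path)' substring scans by one position-major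
-- multi-pattern scan collecting matched rule indices into a set; return values proved equal
-- whenever 'path' is present.

-- ===== PORT A =====
-- literal transliteration of _analyze_rule_hits: straight-line appends
def analyze_rule_hits_py (request : List (String × String)) (response : List (String × Int)) : List (List (String × String)) :=
  match (PySem.Dict.mk request).get? "path" with
  | none => []   -- KeyError in Python; excluded by Pre_
  | some p =>
    let path := PySem.Str.lower p
    let rule_hits : List (List (String × String)) := []
    let sql_patterns := ["'", "union", "select", "or", "and", "drop", "insert"]
    let rule_hits := if sql_patterns.any (fun pat => PySem.Str.isIn pat path) then
        rule_hits ++ [[("rule_id", "SQL_INJECTION"), ("severity", "HIGH"), ("pattern", "SQL injection pattern detected")]]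
      else rule_hits
    let xss_patterns := ["<script", "javascript:", "onerror", "onload"]
    let rule_hits := if xss_patterns.any (fun pat => PySem.Str.isIn pat path) then
        rule_hits ++ [[("rule_id", "XSS"), ("severity", "HIGH"), ("pattern", "XSS pattern detected")]]
      else rule_hits
    let traversal_patterns := ["../", "..\\", "%2e%2e"]
    let rule_hits := if traversal_patterns.any (fun pat => PySem.Str.isIn pat path) then
        rule_hits ++ [[("rule_id", "PATH_TRAVERSAL"), ("severity", "HIGH"), ("pattern", "Path traversal pattern detected")]]
      else rule_hits
    let cmd_patterns := [";", "|", "&", "$", "cat", "ls", "dir"]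
    let rule_hits := if cmd_patterns.any (fun pat => PySem.Str.isIn pat path) then
        rule_hits ++ [[("rule_id", "COMMAND_INJECTION"), ("severity", "HIGH"), ("pattern", "Command injection pattern detected")]]
      else rule_hits
    let rule_hits := if (PySem.Dict.mk response).get? "status_code" = some 429 then
        rule_hits ++ [[("rule_id", "RATE_LIMIT"), ("severity", "MEDIUM"), ("pattern", "Rate limit exceeded")]]
      else rule_hits
    rule_hits

-- ===== PORT B =====
def pvRules : List (String × String × String) :=
  [("SQL_INJECTION", "HIGH", "SQL injection pattern detected"),
   ("XSS", "HIGH", "XSS pattern detected"),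
   ("PATH_TRAVERSAL", "HIGH", "Path traversal pattern detected"),
   ("COMMAND_INJECTION", "HIGH", "Command injection pattern detected")]

def pvPatterns : List (String × Int) :=
  [("'", 0), ("union", 0), ("select", 0), ("or", 0), ("and", 0), ("drop", 0), ("insert", 0),
   ("<script", 1), ("javascript:", 1), ("onerror", 1), ("onload", 1),
   ("../", 2), ("..\\", 2), ("%2e%2e", 2),
   (";", 3), ("|", 3), ("&", 3), ("$", 3), ("cat", 3), ("ls", 3), ("dir", 3)]

-- transliteration of Source B: position-major scan; path.startswith(pat, i) for 0 ≤ i ≤ len(path)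
-- is exactly 'Chars.startswith (path.drop i) pat' (the start offset here is always in range).
def analyze_rule_hits_py_alt (request : List (String × String)) (response : List (String × Int)) : List (List (String × String)) :=
  match (PySem.Dict.mk request).get? "path" with
  | none => []   -- KeyError in Python; excluded by Pre_
  | some p =>
    let path := (PySem.Str.lower p).toList
    let matched : PySem.Set Int :=
      (PySem.List.pyRange 0 ((path.length : Int) + 1) 1).foldl
        (fun m i => pvPatterns.foldl
          (fun m pr => if PySem.Chars.startswith (path.drop i.toNat) pr.1.toList then PySem.Set.add m pr.2 else m) m)
        PySem.Set.empty
    let hits := ((PySem.List.enumerate pvRules).filter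
        (fun er => PySem.Set.contains matched er.1)).map
      (fun er => [("rule_id", er.2.1), ("severity", er.2.2.1), ("pattern", er.2.2.2)])
    if (PySem.Dict.mk response).get? "status_code" = some 429 then
      hits ++ [[("rule_id", "RATE_LIMIT"), ("severity", "MEDIUM"), ("pattern", "Rate limit exceeded")]]
    else hits

-- ===== PRECONDITION & SPEC =====
-- Pre_ excludes exactly the requests without a 'path' key, on which Python A raises KeyError.
def Pre_analyze_rule_hits_py (request : List (String × String)) (response : List (String × Int)) : Prop :=
  (PySem.Dict.mk request).contains "path" = true
instance (request : List (String × String)) (response : List (String × Int)) : Decidable (Pre_analyze_rule_hits_py request response) := by unfold Pre_analyze_rule_hits_py; infer_instance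

def pvWitness_analyze_rule_hits_py : (List (String × String)) × (List (String × Int)) :=
  ([("path", "/a/union/x")], [("status_code", 429)])

def Spec_analyze_rule_hits_py (request : List (String × String)) (response : List (String × Int)) (out : List (List (String × String))) : Prop := out = analyze_rule_hits_py_alt request response
instance (request : List (String × String)) (response : List (String × Int)) (out : List (List (String × String))) : Decidable (Spec_analyze_rule_hits_py request response out) := by unfold Spec_analyze_rule_hits_py; infer_instance

-- ===== CLAIM =====
def Claim_equal_analyze_rule_hits_py : Prop := ∀ (request : List (String × String)) (response : List (String × Int)), Dom_analyze_rule_hits_py request response → Pre_analyze_rule_hits_py request response → Spec_analyze_rule_hits_py request response (analyze_rule_hits_py request response)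

-- ===== LEMMAS AND PROOFS =====

-- membership after the inner fold over the pattern table
lemma mem_inner_fold (path : List Char) (ps : List (String × Int)) (m : PySem.Set Int) (i : Int) (x : Int) :
    x ∈ ps.foldl (fun m pr => if PySem.Chars.startswith (path.drop i.toNat) pr.1.toList then PySem.Set.add m pr.2 else m) m ↔
      x ∈ m ∨ ∃ pr ∈ ps, PySem.Chars.startswith (path.drop i.toNat) pr.1.toList = true ∧ pr.2 = x := by
  induction ps generalizing m with
  | nil => simp
  | cons hd tl ih =>
    simp only [List.foldl_cons, ih]
    by_cases h : PySem.Chars.startswith (path.drop i.toNat) hd.1.toList = true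
    all_goals simp [h, PySem.Set.mem_add]
    all_goals tauto

-- membership after the outer fold over start positions
lemma mem_outer_fold (path : List Char) (idxs : List Int) (m : PySem.Set Int) (x : Int) :
    x ∈ idxs.foldl
        (fun m i => pvPatterns.foldl
          (fun m pr => if PySem.Chars.startswith (path.drop i.toNat) pr.1.toList then PySem.Set.add m pr.2 else m) m) m ↔
      x ∈ m ∨ ∃ i ∈ idxs, ∃ pr ∈ pvPatterns, PySem.Chars.startswith (path.drop i.toNat) pr.1.toList = true ∧ pr.2 = x := by
  induction idxs generalizing m with
  | nil => simp
  | cons hd tl ih =>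
    simp only [List.foldl_cons, ih, mem_inner_fold]
    constructor
    · rintro (h | h)
      · rcases h with h | ⟨pr, hpr, hs, hx⟩
        · exact Or.inl h
        · exact Or.inr ⟨hd, by simp, pr, hpr, hs, hx⟩
      · rcases h with ⟨i, hi, pr, hpr, hs, hx⟩
        exact Or.inr ⟨i, by simp [hi], pr, hpr, hs, hx⟩
    · rintro (h | ⟨i, hi, pr, hpr, hs, hx⟩)
      · exact Or.inl (Or.inl h)
      · rcases List.mem_cons.mp hi with rfl | hi
        · exact Or.inl (Or.inr ⟨pr, hpr, hs, hx⟩)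
        · exact Or.inr ⟨i, hi, pr, hpr, hs, hx⟩

-- a pattern starts at some scanned position iff it is a substring
lemma exists_pos_iff_isIn (path sub : List Char) :
    (∃ i ∈ PySem.List.pyRange 0 ((path.length : Int) + 1) 1, PySem.Chars.startswith (path.drop i.toNat) sub = true) ↔
      PySem.Chars.isIn sub path = true := by
  rw [← PySem.Chars.exists_prefix_drop_iff_isIn]
  constructor
  · rintro ⟨i, _, hs⟩
    exact ⟨i.toNat, (PySem.Chars.startswith_iff _ _).mp hs⟩
  · rintro ⟨j, hj⟩
    refine ⟨(min j path.length : Nat), ?_, ?_⟩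
    · rw [PySem.List.mem_pyRange_one]
      constructor <;> [exact Int.natCast_nonneg _; exact_mod_cast Nat.lt_succ_of_le (Nat.min_le_right _ _)]
    · rw [PySem.Chars.startswith_iff]
      rcases Nat.le_total j path.length with h | h
      · simpa [Nat.min_eq_left h] using hj
      · have : path.drop j = [] := List.drop_eq_nil_of_le h
        rw [this] at hj
        have : sub = [] := List.prefix_nil.mp hj
        simp [this]

-- the matched set contains rule index x iff some pattern of that rule occurs in the path
lemma contains_matched (path : List Char) (x : Int) :
    PySem.Set.contains
      ((PySem.List.pyRange 0 ((path.length : Int) + 1) 1).foldl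
        (fun m i => pvPatterns.foldl
          (fun m pr => if PySem.Chars.startswith (path.drop i.toNat) pr.1.toList then PySem.Set.add m pr.2 else m) m)
        PySem.Set.empty) x = true ↔
      ∃ pr ∈ pvPatterns, PySem.Chars.isIn pr.1.toList path = true ∧ pr.2 = x := by
  have : ∀ (s : PySem.Set Int), PySem.Set.contains s x = true ↔ x ∈ s := by
    intro s; simp [PySem.Set.contains]
  rw [this, mem_outer_fold]
  simp only [PySem.Set.empty, List.not_mem_nil, false_or]
  constructor
  · rintro ⟨i, hi, pr, hpr, hs, hx⟩
    exact ⟨pr, hpr, (exists_pos_iff_isIn path pr.1.toList).mp ⟨i, hi, hs⟩, hx⟩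
  · rintro ⟨pr, hpr, hin, hx⟩
    rcases (exists_pos_iff_isIn path pr.1.toList).mpr hin with ⟨i, hi, hs⟩
    exact ⟨i, hi, pr, hpr, hs, hx⟩

-- ===== VERDICT =====
set_option maxHeartbeats 1600000 in
set_option maxRecDepth 8000 in
theorem analyze_rule_hits_py_spec : Claim_equal_analyze_rule_hits_py := by
  intro request response _ hpre
  unfold Spec_analyze_rule_hits_py analyze_rule_hits_py analyze_rule_hits_py_alt
  cases h : (PySem.Dict.mk request).get? "path" with
  | none =>
      exfalso
      unfold Pre_analyze_rule_hits_py at hpre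
      rw [PySem.Dict.contains_eq_isSome_get?, h] at hpre
      simp at hpre
  | some p =>
      dsimp only
      set L := (PySem.Str.lower p).toList with hL
      set M := (PySem.List.pyRange 0 ((L.length : Int) + 1) 1).foldl
        (fun m i => pvPatterns.foldl
          (fun m pr => if PySem.Chars.startswith (L.drop i.toNat) pr.1.toList then PySem.Set.add m pr.2 else m) m)
        PySem.Set.empty with hM
      have key : ∀ (x : Int) (pats : List String),
          (pvPatterns.filter (fun pr => pr.2 == x)).map (·.1) = pats →
          M.contains x = pats.any (fun pat => PySem.Str.isIn pat (PySem.Str.lower p)) := by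
        intro x pats hp
        rw [Bool.eq_iff_iff, hM, contains_matched L x]
        subst hp
        simp only [List.any_eq_true, List.mem_map, List.mem_filter, beq_iff_eq, PySem.Str.isIn_eq, hL]
        constructor
        · rintro ⟨pr, hpr, hin, hx⟩
          exact ⟨pr.1, ⟨pr, ⟨hpr, by simp [hx]⟩, rfl⟩, hin⟩
        · rintro ⟨pat, ⟨pr, ⟨hpr, hx⟩, rfl⟩, hin⟩
          exact ⟨pr, hpr, hin, by simpa using hx⟩
      have e0 := key 0 ["'", "union", "select", "or", "and", "drop", "insert"] (by decide)
      have e1 := key (0+1) ["<script", "javascript:", "onerror", "onload"] (by decide)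
      have e2 := key (0+1+1) ["../", "..\\", "%2e%2e"] (by decide)
      have e3 := key (0+1+1+1) [";", "|", "&", "$", "cat", "ls", "dir"] (by decide)
      simp only [pvRules, PySem.List.enumerate_cons, PySem.List.enumerate_nil, List.filter_cons,
        List.filter_nil, e0, e1, e2, e3]
      split_ifs <;> simp
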